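-- pv_equiv track=rewrite | github.com/def9a2a4/HeadSmith | data/generate_mini_blocks.py | material_to_search_names
-- ===== SOURCE A (Python) =====
-- COLORS = [
--     "White",
--     "Orange",
--     "Magenta",
--     "Light Blue",
--     "Yellow",
--     "Lime",
--     "Pink",
--     "Gray",
--     "Light Gray",
--     "Cyan",
--     "Purple",
--     "Blue",
--     "Brown",
--     "Green",
--     "Red",
--     "Black",
-- ]
--
-- def material_to_search_names(material):
--     """Returns list of possible CSV names for a material"""
--     base = material.replace("_", " ").title()
--     names = [base]
--
--     # Handle "Color BlockType" -> "BlockType (color)" pattern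
--     # e.g. "Orange Concrete" -> "Concrete (orange)"
--     for color in COLORS:
--         if base.startswith(color + " "):
--             rest = base[len(color) + 1 :]  # e.g. "Concrete"
--             names.append(f"{rest} ({color.lower()})")
--             break
--
--     # Special aliases
--     if base == "Hay Block":
--         names.append("Hay Bale")
--
--     return names
-- ===== SOURCE B (Python) =====
-- COLORS = [
--     "White",
--     "Orange",
--     "Magenta",
--     "Light Blue",
--     "Yellow",
--     "Lime",
--     "Pink",
--     "Gray",
--     "Light Gray",
--     "Cyan",
--     "Purple",
--     "Blue",
--     "Brown",
--     "Green",
--     "Red",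
--     "Black",
-- ]
--
-- COLOR_SET = frozenset(COLORS)
--
-- def material_to_search_names(material):
--     """Returns list of possible CSV names for a material"""
--     base = material.replace("_", " ").title()
--     names = [base]
--
--     # Candidate color prefixes come from the input itself: the text before the
--     # second space (two-word colors) and before the first space (one-word colors).
--     i = base.find(" ")
--     if i != -1:
--         j = base.find(" ", i + 1)
--         candidates = [base[:j]] if j != -1 else []
--         candidates.append(base[:i])
--         for prefix in candidates:
--             if prefix in COLOR_SET:
--                 names.append(f"{base[len(prefix) + 1:]} ({prefix.lower()})")
--                 break
--
--     if base == "Hay Block":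
--         names.append("Hay Bale")
--     return names
-- ===== Notes on version B (the rewrite author's own statement) =====
-- stated objective: alternative
-- what changed: Instead of scanning all 16 colors with startswith, B derives at most two candidate prefixes from the input itself (the text before the first and second space) and tests them against a precomputed frozenset of colors.
import Mathlib
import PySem

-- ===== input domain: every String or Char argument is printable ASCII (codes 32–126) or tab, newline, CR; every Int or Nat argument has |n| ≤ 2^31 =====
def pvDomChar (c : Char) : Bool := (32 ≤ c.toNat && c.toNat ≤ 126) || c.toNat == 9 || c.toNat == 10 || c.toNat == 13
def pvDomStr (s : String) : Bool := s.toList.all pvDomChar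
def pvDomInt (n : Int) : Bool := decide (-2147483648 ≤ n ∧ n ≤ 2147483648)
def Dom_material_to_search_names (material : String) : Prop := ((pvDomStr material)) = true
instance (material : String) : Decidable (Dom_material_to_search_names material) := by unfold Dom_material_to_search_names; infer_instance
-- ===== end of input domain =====

-- B replaces A's scan over all 16 colors by at most two candidate prefixes read off the
-- input (text before the first/second space) tested against a color set (objective: alternative).

-- Shared module constant COLORS
def pvColors : List String :=
  ["White", "Orange", "Magenta", "Light Blue", "Yellow", "Lime", "Pink", "Gray",
   "Light Gray", "Cyan", "Purple", "Blue", "Brown", "Green", "Red", "Black"]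

-- Hand port of Python str.title() (PySem has no title): exact on the ASCII domain —
-- a letter is uppercased when the previous character is not a letter, lowercased otherwise.
def pyTitleChars : Bool → List Char → List Char
  | _, [] => []
  | prev, c :: rest =>
    (if PySem.Chars.isalpha c then
       (if prev then PySem.Chars.lowerChar c else PySem.Chars.upperChar c)
     else c) :: pyTitleChars (PySem.Chars.isalpha c) rest

-- base = material.replace("_", " ").title()   (shared first line of A and B)
def pvBase (material : String) : String :=
  String.ofList (pyTitleChars false (PySem.Str.replace material "_" " ").toList)

-- ===== PORT A =====
-- the for-loop over COLORS with break
def aColorLoop (base : String) (names : List String) : List String → List String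
  | [] => names
  | c :: rest =>
    if PySem.Str.startswith base (c ++ " ") then
      names ++ [PySem.Str.slice base (some (PySem.Str.len c + 1)) none ++ " (" ++ PySem.Str.lower c ++ ")"]
    else aColorLoop base names rest

def material_to_search_names (material : String) : List String :=
  let base := pvBase material
  let names := [base]
  let names := aColorLoop base names pvColors
  if base == "Hay Block" then names ++ ["Hay Bale"] else names

-- ===== PORT B =====
def pvColorSet : PySem.Set String := PySem.Set.ofList pvColors

-- the for-loop over the candidate prefixes with break
def bPrefixLoop (base : String) (names : List String) : List String → List String
  | [] => names
  | p :: rest =>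
    if pvColorSet.contains p then
      names ++ [PySem.Str.slice base (some (PySem.Str.len p + 1)) none ++ " (" ++ PySem.Str.lower p ++ ")"]
    else bPrefixLoop base names rest

def material_to_search_names_alt (material : String) : List String :=
  let base := pvBase material
  let names := [base]
  let i := PySem.Str.find base " "
  let names :=
    if i != -1 then
      let j := PySem.Str.findFrom base " " (i + 1) none
      let candidates :=
        (if j != -1 then [PySem.Str.slice base none (some j)] else []) ++
          [PySem.Str.slice base none (some i)]
      bPrefixLoop base names candidates
    else names
  if base == "Hay Block" then names ++ ["Hay Bale"] else names

-- ===== PRECONDITION & SPEC =====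
def Spec_material_to_search_names (material : String) (out : List String) : Prop := out = material_to_search_names_alt material
instance (material : String) (out : List String) : Decidable (Spec_material_to_search_names material out) := by unfold Spec_material_to_search_names; infer_instance

-- ===== CLAIM (what is proved, stated in full; the proofs are below) =====
def Claim_equal_material_to_search_names : Prop := ∀ (material : String), Dom_material_to_search_names material → Spec_material_to_search_names material (material_to_search_names material)

-- ===== LEMMAS AND PROOFS =====

lemma pv_colorSet_eq : pvColorSet = pvColors := rfl

lemma pv_singleton_prefix (a : Char) (l : List Char) : [a] <+: l ↔ l[0]? = some a := by
  cases l <;> simp [List.cons_prefix_cons, eq_comm]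

lemma pv_split_first_space (bs : List Char) (hs : ' ' ∈ bs) :
    ∃ u t, bs = u ++ ' ' :: t ∧ ' ' ∉ u := by
  induction bs with
  | nil => cases hs
  | cons c rest ih =>
    by_cases hc : c = ' '
    · exact ⟨[], rest, by simp [hc], by simp⟩
    · have hs' : ' ' ∈ rest := by
        rcases List.mem_cons.mp hs with h | h
        · exact absurd h.symm hc
        · exact h
      obtain ⟨u, t, hrest, hu⟩ := ih hs'
      refine ⟨c :: u, t, by simp [hrest], ?_⟩
      simp only [List.mem_cons, not_or]
      exact ⟨fun h => hc h.symm, hu⟩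

lemma pv_prefix_word_iff (c u r t : List Char) (hc : ' ' ∉ c) (hu : ' ' ∉ u) :
    ((c ++ ' ' :: r) <+: (u ++ ' ' :: t)) ↔ c = u ∧ r <+: t := by
  induction c generalizing u with
  | nil =>
    cases u with
    | nil => simp [List.cons_prefix_cons]
    | cons x u' =>
      simp only [List.nil_append, List.cons_append, List.cons_prefix_cons]
      constructor
      · rintro ⟨rfl, -⟩
        exact absurd List.mem_cons_self hu
      · rintro ⟨h, -⟩
        exact absurd h (by simp)
  | cons a c' ih =>
    cases u with
    | nil =>
      simp only [List.cons_append, List.nil_append, List.cons_prefix_cons]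
      constructor
      · rintro ⟨rfl, -⟩
        exact absurd List.mem_cons_self hc
      · rintro ⟨h, -⟩
        exact absurd h (by simp)
    | cons x u' =>
      have hc' : ' ' ∉ c' := fun h => hc (List.mem_cons_of_mem _ h)
      have hu' : ' ' ∉ u' := fun h => hu (List.mem_cons_of_mem _ h)
      simp only [List.cons_append, List.cons_prefix_cons, ih u' hc' hu', List.cons.injEq]
      tauto

lemma pv_space_append_inj {u u' v v' : List Char} (hu : ' ' ∉ u) (hu' : ' ' ∉ u')
    (h : u ++ ' ' :: v = u' ++ ' ' :: v') : u = u' ∧ v = v' := by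
  induction u generalizing u' with
  | nil =>
    cases u' with
    | nil => simpa using h
    | cons x u'' =>
      simp only [List.nil_append, List.cons_append, List.cons.injEq] at h
      exact absurd (h.1 ▸ List.mem_cons_self) hu'
  | cons a u₀ ih =>
    cases u' with
    | nil =>
      simp only [List.cons_append, List.nil_append, List.cons.injEq] at h
      exact absurd (h.1.symm ▸ List.mem_cons_self) hu
    | cons x u'' =>
      simp only [List.cons_append, List.cons.injEq] at h
      obtain ⟨rfl, h2⟩ := h
      have := ih (fun hm => hu (List.mem_cons_of_mem _ hm)) (fun hm => hu' (List.mem_cons_of_mem _ hm)) h2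
      exact ⟨by rw [this.1], this.2⟩

lemma pv_find_space_eq (u t : List Char) (hu : ' ' ∉ u) :
    PySem.Chars.find (u ++ ' ' :: t) [' '] = (u.length : Int) := by
  have hinf : [' '] <:+: (u ++ ' ' :: t) := by
    rw [List.singleton_infix_iff]; simp
  have h0 : 0 ≤ PySem.Chars.find (u ++ ' ' :: t) [' '] :=
    (PySem.Chars.find_nonneg_iff _ _).mpr hinf
  obtain ⟨hpre, hmin⟩ := PySem.Chars.find_spec h0
  set f := (PySem.Chars.find (u ++ ' ' :: t) [' ']).toNat with hf
  have hle : ¬ f < u.length := by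
    intro hlt
    rw [pv_singleton_prefix, List.getElem?_drop] at hpre
    simp only [Nat.add_zero] at hpre
    rw [List.getElem?_append_left (by omega)] at hpre
    exact hu (List.mem_of_getElem? (by simpa using hpre))
  have hge : ¬ u.length < f := by
    intro hlt
    exact hmin u.length hlt (by rw [pv_singleton_prefix, List.getElem?_drop]
                                simp)
  omega

-- startswith test of a one-word color against base = u ⬝ ' ' ⬝ t is equality with the first word
lemma pv_sw_one (base : String) (u t : List Char) (hu : ' ' ∉ u) (hbs : base.toList = u ++ ' ' :: t)
    (p1 : String) (hp1l : p1.toList = u) (c : String) (hc : ' ' ∉ c.toList) :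
    PySem.Str.startswith base (c ++ " ") = (p1 == c) := by
  rw [Bool.eq_iff_iff, beq_iff_eq]
  rw [PySem.Str.startswith_eq, String.toList_append,
    show (" " : String).toList = [' '] from by decide, hbs]
  simp only [PySem.Chars.startswith]
  rw [List.isPrefixOf_iff_prefix,
    show c.toList ++ [' '] = c.toList ++ ' ' :: ([] : List Char) from rfl,
    pv_prefix_word_iff c.toList u [] t hc hu]
  simp only [List.nil_prefix, and_true]
  rw [← hp1l, String.toList_inj]
  exact eq_comm

-- startswith test of a two-word color, reduced to its two words
lemma pv_sw_two (base : String) (u t : List Char) (hu : ' ' ∉ u) (hbs : base.toList = u ++ ' ' :: t)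
    (c : String) (c1 c2 : List Char) (hc1 : ' ' ∉ c1)
    (hsplit : (c ++ " ").toList = c1 ++ ' ' :: (c2 ++ [' '])) :
    PySem.Str.startswith base (c ++ " ") = true ↔ (c1 = u ∧ (c2 ++ [' ']) <+: t) := by
  rw [PySem.Str.startswith_eq, hsplit, hbs]
  simp only [PySem.Chars.startswith]
  rw [List.isPrefixOf_iff_prefix]
  exact pv_prefix_word_iff c1 u (c2 ++ [' ']) t hc1 hu

-- crunch: one candidate (no second space in base)
lemma pv_crunch1 (base : String) (names : List String) (p1 : String)
    (hsw : ∀ c : String, ' ' ∉ c.toList → PySem.Str.startswith base (c ++ " ") = (p1 == c))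
    (hLB : PySem.Str.startswith base ("Light Blue" ++ " ") = false)
    (hLG : PySem.Str.startswith base ("Light Gray" ++ " ") = false)
    (hp1 : ' ' ∉ p1.toList) :
    aColorLoop base names pvColors = bPrefixLoop base names [p1] := by
  simp only [pvColors, aColorLoop, bPrefixLoop,
    hsw "White" (by decide), hsw "Orange" (by decide), hsw "Magenta" (by decide), hLB,
    hsw "Yellow" (by decide), hsw "Lime" (by decide), hsw "Pink" (by decide),
    hsw "Gray" (by decide), hLG, hsw "Cyan" (by decide), hsw "Purple" (by decide),
    hsw "Blue" (by decide), hsw "Brown" (by decide), hsw "Green" (by decide),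
    hsw "Red" (by decide), hsw "Black" (by decide), Bool.false_eq_true, if_false]
  by_cases hmem : p1 ∈ pvColors
  · simp only [pvColors, List.mem_cons, List.not_mem_nil, or_false] at hmem
    rcases hmem with rfl|rfl|rfl|rfl|rfl|rfl|rfl|rfl|rfl|rfl|rfl|rfl|rfl|rfl|rfl|rfl
    · simp [pv_colorSet_eq, pvColors]
    · simp [pv_colorSet_eq, pvColors]
    · simp [pv_colorSet_eq, pvColors]
    · exact absurd (by decide) hp1
    · simp [pv_colorSet_eq, pvColors]
    · simp [pv_colorSet_eq, pvColors]
    · simp [pv_colorSet_eq, pvColors]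
    · simp [pv_colorSet_eq, pvColors]
    · exact absurd (by decide) hp1
    · simp [pv_colorSet_eq, pvColors]
    · simp [pv_colorSet_eq, pvColors]
    · simp [pv_colorSet_eq, pvColors]
    · simp [pv_colorSet_eq, pvColors]
    · simp [pv_colorSet_eq, pvColors]
    · simp [pv_colorSet_eq, pvColors]
    · simp [pv_colorSet_eq, pvColors]
  · simp only [pvColors, List.mem_cons, List.not_mem_nil, or_false, not_or] at hmem
    obtain ⟨h1, h2, h3, h4, h5, h6, h7, h8, h9, h10, h11, h12, h13, h14, h15, h16⟩ := hmem
    simp [pv_colorSet_eq, pvColors, h1, h2, h3, h4, h5, h6, h7, h8, h9, h10, h11, h12, h13, h14, h15, h16]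

-- crunch: two candidates (base has at least two spaces)
lemma pv_crunch2 (base : String) (names : List String) (p1 p2 : String) (u2 : List Char)
    (hsw : ∀ c : String, ' ' ∉ c.toList → PySem.Str.startswith base (c ++ " ") = (p1 == c))
    (hswLB : PySem.Str.startswith base ("Light Blue" ++ " ") = (p2 == "Light Blue"))
    (hswLG : PySem.Str.startswith base ("Light Gray" ++ " ") = (p2 == "Light Gray"))
    (hp1 : ' ' ∉ p1.toList)
    (hp2 : p2.toList = p1.toList ++ ' ' :: u2) :
    aColorLoop base names pvColors = bPrefixLoop base names [p2, p1] := by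
  have hsp2mem : ' ' ∈ p2.toList := by rw [hp2]; simp
  simp only [pvColors, aColorLoop, bPrefixLoop,
    hsw "White" (by decide), hsw "Orange" (by decide), hsw "Magenta" (by decide), hswLB,
    hsw "Yellow" (by decide), hsw "Lime" (by decide), hsw "Pink" (by decide),
    hsw "Gray" (by decide), hswLG, hsw "Cyan" (by decide), hsw "Purple" (by decide),
    hsw "Blue" (by decide), hsw "Brown" (by decide), hsw "Green" (by decide),
    hsw "Red" (by decide), hsw "Black" (by decide)]
  by_cases hm2 : p2 = "Light Blue"
  · have hp1L : p1 = "Light" := by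
      apply String.toList_inj.mp
      have h := congrArg String.toList hm2
      rw [hp2, show ("Light Blue" : String).toList = "Light".toList ++ ' ' :: "Blue".toList from by decide] at h
      exact (pv_space_append_inj hp1 (by decide) h).1
    subst hm2; subst hp1L
    simp [pv_colorSet_eq, pvColors]
  · by_cases hm2' : p2 = "Light Gray"
    · have hp1L : p1 = "Light" := by
        apply String.toList_inj.mp
        have h := congrArg String.toList hm2'
        rw [hp2, show ("Light Gray" : String).toList = "Light".toList ++ ' ' :: "Gray".toList from by decide] at h
        exact (pv_space_append_inj hp1 (by decide) h).1
      subst hm2'; subst hp1L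
      simp [pv_colorSet_eq, pvColors]
    · have hb2LB : (p2 == "Light Blue") = false := by simp [hm2]
      have hb2LG : (p2 == "Light Gray") = false := by simp [hm2']
      have hcont2 : pvColorSet.contains p2 = false := by
        rw [Bool.eq_false_iff]
        intro hc
        have hmem2 : p2 ∈ pvColors := by simpa using hc
        simp only [pvColors, List.mem_cons, List.not_mem_nil, or_false] at hmem2
        rcases hmem2 with rfl|rfl|rfl|rfl|rfl|rfl|rfl|rfl|rfl|rfl|rfl|rfl|rfl|rfl|rfl|rfl
        · exact absurd hsp2mem (by decide)
        · exact absurd hsp2mem (by decide)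
        · exact absurd hsp2mem (by decide)
        · exact hm2 rfl
        · exact absurd hsp2mem (by decide)
        · exact absurd hsp2mem (by decide)
        · exact absurd hsp2mem (by decide)
        · exact absurd hsp2mem (by decide)
        · exact hm2' rfl
        · exact absurd hsp2mem (by decide)
        · exact absurd hsp2mem (by decide)
        · exact absurd hsp2mem (by decide)
        · exact absurd hsp2mem (by decide)
        · exact absurd hsp2mem (by decide)
        · exact absurd hsp2mem (by decide)
        · exact absurd hsp2mem (by decide)
      simp only [hb2LB, hb2LG, hcont2, Bool.false_eq_true, if_false]
      by_cases hmem : p1 ∈ pvColors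
      · simp only [pvColors, List.mem_cons, List.not_mem_nil, or_false] at hmem
        rcases hmem with rfl|rfl|rfl|rfl|rfl|rfl|rfl|rfl|rfl|rfl|rfl|rfl|rfl|rfl|rfl|rfl
        · simp [pv_colorSet_eq, pvColors]
        · simp [pv_colorSet_eq, pvColors]
        · simp [pv_colorSet_eq, pvColors]
        · exact absurd (by decide) hp1
        · simp [pv_colorSet_eq, pvColors]
        · simp [pv_colorSet_eq, pvColors]
        · simp [pv_colorSet_eq, pvColors]
        · simp [pv_colorSet_eq, pvColors]
        · exact absurd (by decide) hp1
        · simp [pv_colorSet_eq, pvColors]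
        · simp [pv_colorSet_eq, pvColors]
        · simp [pv_colorSet_eq, pvColors]
        · simp [pv_colorSet_eq, pvColors]
        · simp [pv_colorSet_eq, pvColors]
        · simp [pv_colorSet_eq, pvColors]
        · simp [pv_colorSet_eq, pvColors]
      · simp only [pvColors, List.mem_cons, List.not_mem_nil, or_false, not_or] at hmem
        obtain ⟨h1, h2, h3, h4, h5, h6, h7, h8, h9, h10, h11, h12, h13, h14, h15, h16⟩ := hmem
        simp [pv_colorSet_eq, pvColors, h1, h2, h3, h4, h5, h6, h7, h8, h9, h10, h11, h12, h13, h14, h15, h16]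

-- main key lemma: the two middle blocks agree
lemma pv_key (base : String) (names : List String) :
    aColorLoop base names pvColors =
      (if PySem.Str.find base " " != -1 then
        bPrefixLoop base names
          ((if PySem.Str.findFrom base " " (PySem.Str.find base " " + 1) none != -1 then
              [PySem.Str.slice base none (some (PySem.Str.findFrom base " " (PySem.Str.find base " " + 1) none))]
            else []) ++
            [PySem.Str.slice base none (some (PySem.Str.find base " "))])
      else names) := by
  have hsp : (" " : String).toList = [' '] := by decide
  by_cases hs : ' ' ∈ base.toList
  · obtain ⟨u, t, hbs, hu⟩ := pv_split_first_space _ hs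
    have hfind : PySem.Str.find base " " = (u.length : Int) := by
      rw [PySem.Str.find_eq, hsp, hbs, pv_find_space_eq _ _ hu]
    have hlen : u.length + 1 ≤ base.toList.length := by
      rw [hbs]; simp [List.length_append]
    have hff : PySem.Str.findFrom base " " ((u.length : Int) + 1) none
        = (if PySem.Chars.find t [' '] = -1 then -1
           else ((u.length + 1 : Nat) : Int) + PySem.Chars.find t [' ']) := by
      rw [PySem.Str.findFrom_eq, hsp,
        show ((u.length : Int) + 1) = ((u.length + 1 : Nat) : Int) from by push_cast; ring,
        PySem.Chars.findFrom_natCast _ _ _ hlen]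
      have hdrop : List.drop (u.length + 1) base.toList = t := by
        rw [hbs, show u ++ ' ' :: t = (u ++ [' ']) ++ t from by simp]
        exact List.drop_left' (by simp)
      rw [hdrop]
    have hp1l : (PySem.Str.slice base none (some (u.length : Int))).toList = u := by
      rw [PySem.Str.toList_slice]
      simp only [PySem.Chars.slice_eq_listSlice]
      rw [PySem.List.slice_to_natCast, hbs]
      exact List.take_left' rfl
    have hp1sf : ' ' ∉ (PySem.Str.slice base none (some (u.length : Int))).toList := by
      rw [hp1l]; exact hu
    rw [hfind]
    rw [if_pos (by simp)]
    by_cases hs2 : ' ' ∈ t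
    · obtain ⟨u2, t2, ht, hu2⟩ := pv_split_first_space t hs2
      have hfind2 : PySem.Chars.find t [' '] = (u2.length : Int) := by
        rw [ht, pv_find_space_eq _ _ hu2]
      rw [hff, hfind2,
        if_neg (show ¬ ((u2.length : Int) = -1) from by omega),
        if_pos (show ((((u.length + 1 : Nat) : Int) + (u2.length : Int)) != -1) = true from by
          simp only [bne_iff_ne, ne_eq]
          omega)]
      have hp2l : (PySem.Str.slice base none (some (((u.length + 1 : Nat) : Int) + (u2.length : Int)))).toList
          = u ++ ' ' :: u2 := by
        rw [PySem.Str.toList_slice]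
        simp only [PySem.Chars.slice_eq_listSlice]
        rw [show (((u.length + 1 : Nat) : Int) + (u2.length : Int)) = ((u.length + 1 + u2.length : Nat) : Int) from by push_cast; ring,
          PySem.List.slice_to_natCast, hbs, ht,
          show u ++ ' ' :: (u2 ++ ' ' :: t2) = (u ++ ' ' :: u2) ++ ' ' :: t2 from by simp]
        exact List.take_left' (by simp [List.length_append]; omega)
      rw [List.singleton_append]
      apply pv_crunch2 base names _ _ u2
      · intro c hc
        exact pv_sw_one base u t hu hbs _ hp1l c hc
      · rw [Bool.eq_iff_iff, beq_iff_eq]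
        rw [pv_sw_two base u t hu hbs "Light Blue" "Light".toList "Blue".toList (by decide) (by decide)]
        rw [ht, show "Blue".toList ++ [' '] = "Blue".toList ++ ' ' :: ([] : List Char) from rfl,
          pv_prefix_word_iff "Blue".toList u2 [] t2 (by decide) hu2]
        simp only [List.nil_prefix, and_true]
        constructor
        · rintro ⟨hA, hB⟩
          apply String.toList_inj.mp
          rw [hp2l, ← hA, ← hB]
          decide
        · intro h
          have h' := congrArg String.toList h
          rw [hp2l, show ("Light Blue" : String).toList = "Light".toList ++ ' ' :: "Blue".toList from by decide] at h'
          obtain ⟨hA, hB⟩ := pv_space_append_inj hu (by decide) h'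
          exact ⟨hA.symm, hB.symm⟩
      · rw [Bool.eq_iff_iff, beq_iff_eq]
        rw [pv_sw_two base u t hu hbs "Light Gray" "Light".toList "Gray".toList (by decide) (by decide)]
        rw [ht, show "Gray".toList ++ [' '] = "Gray".toList ++ ' ' :: ([] : List Char) from rfl,
          pv_prefix_word_iff "Gray".toList u2 [] t2 (by decide) hu2]
        simp only [List.nil_prefix, and_true]
        constructor
        · rintro ⟨hA, hB⟩
          apply String.toList_inj.mp
          rw [hp2l, ← hA, ← hB]
          decide
        · intro h
          have h' := congrArg String.toList h
          rw [hp2l, show ("Light Gray" : String).toList = "Light".toList ++ ' ' :: "Gray".toList from by decide] at h'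
          obtain ⟨hA, hB⟩ := pv_space_append_inj hu (by decide) h'
          exact ⟨hA.symm, hB.symm⟩
      · exact hp1sf
      · rw [hp2l, hp1l]
    · have hfind2 : PySem.Chars.find t [' '] = -1 := by
        rw [PySem.Chars.find_eq_neg_one_iff, List.singleton_infix_iff]
        exact hs2
      rw [hff, hfind2, if_pos rfl]
      rw [if_neg (by simp)]
      rw [List.nil_append]
      apply pv_crunch1
      · intro c hc
        exact pv_sw_one base u t hu hbs _ hp1l c hc
      · rw [Bool.eq_false_iff]
        intro hh
        have := (pv_sw_two base u t hu hbs "Light Blue" "Light".toList "Blue".toList (by decide) (by decide)).mp hh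
        exact hs2 (this.2.subset (by simp))
      · rw [Bool.eq_false_iff]
        intro hh
        have := (pv_sw_two base u t hu hbs "Light Gray" "Light".toList "Gray".toList (by decide) (by decide)).mp hh
        exact hs2 (this.2.subset (by simp))
      · exact hp1sf
  · have hfind : PySem.Str.find base " " = -1 := by
      rw [PySem.Str.find_eq, hsp, PySem.Chars.find_eq_neg_one_iff, List.singleton_infix_iff]
      exact hs
    rw [hfind, if_neg (by simp)]
    have hsw : ∀ c : String, PySem.Str.startswith base (c ++ " ") = false := by
      intro c
      rw [Bool.eq_false_iff]
      intro hh
      rw [PySem.Str.startswith_eq, String.toList_append, hsp] at hh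
      simp only [PySem.Chars.startswith] at hh
      rw [List.isPrefixOf_iff_prefix] at hh
      exact hs (hh.subset (by simp))
    simp only [pvColors, aColorLoop, hsw, Bool.false_eq_true, if_false]

-- ===== VERDICT (by name: the statement is the Claim_ definition above) =====
theorem material_to_search_names_spec : Claim_equal_material_to_search_names := by
  intro material _
  unfold Spec_material_to_search_names material_to_search_names material_to_search_names_alt
  dsimp only
  rw [pv_key]
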